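-- pv_equiv track=rewrite | github.com/matrxi999/Program_analysis_brainfuck | GTPtranspilerOptimiez.py | optimize_increments_before_input
-- ===== SOURCE A (Python) =====
-- def optimize_increments_before_input(sourcecode):
--     """Remove all '+' and '-' sequences directly before ',' as they are redundant."""
--     optimized_code = ""
--     i = 0
--
--     while i < len(sourcecode):
--         if sourcecode[i] == ',':
--             # Remove any '+' or '-' characters immediately before ','
--             j = i
--             while j > 0 and sourcecode[j - 1] in '+-':
--                 j -= 1
--             optimized_code += sourcecode[:j] + ','
--             sourcecode = sourcecode[i + 1:]
--             i = 0
--         else: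
--             i += 1
--
--     # Append any remaining part of the source code
--     optimized_code += sourcecode
--     return optimized_code
-- ===== SOURCE B (Python) =====
-- def optimize_increments_before_input(sourcecode):
--     """Remove all '+' and '-' sequences directly before ',' as they are redundant."""
--     out = []
--     for ch in sourcecode:
--         if ch == ',':
--             while out and out[-1] in '+-':
--                 out.pop()
--             out.append(',')
--         else:
--             out.append(ch)
--     return ''.join(out)
-- ===== Notes on version B (the rewrite author's own statement) =====
-- stated objective: faster
-- what changed: A rescans backwards and re-slices/concatenates the whole remaining string at every comma (resetting its index to 0); B does one left-to-right pass over the characters, appending to an output list and popping trailing '+'/'-' when a ',' is seen.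
import Mathlib
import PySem

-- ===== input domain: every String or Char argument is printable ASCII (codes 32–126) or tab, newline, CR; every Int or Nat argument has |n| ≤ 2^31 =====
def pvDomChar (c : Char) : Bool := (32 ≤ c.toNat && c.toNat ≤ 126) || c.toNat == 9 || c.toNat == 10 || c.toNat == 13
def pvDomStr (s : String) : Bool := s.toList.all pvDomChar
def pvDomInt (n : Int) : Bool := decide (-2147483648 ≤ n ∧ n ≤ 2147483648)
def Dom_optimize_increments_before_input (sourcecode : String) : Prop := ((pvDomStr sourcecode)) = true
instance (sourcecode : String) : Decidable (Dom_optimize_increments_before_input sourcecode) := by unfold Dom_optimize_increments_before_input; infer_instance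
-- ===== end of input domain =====

-- B replaces A's quadratic rescans-and-reslices loop by a single left-to-right pass
-- that pops trailing '+'/'-' from the output when a ',' is seen (objective: faster).

-- ===== PORT A =====
-- inner while: `while j > 0 and sourcecode[j-1] in '+-': j -= 1`
-- (the index j-1 is always in range here, so getD is exact for Python's sourcecode[j-1])
def pvAStrip (src : List Char) (j : Nat) : Nat :=
  if h : 0 < j ∧ (src.getD (j - 1) ' ' = '+' ∨ src.getD (j - 1) ' ' = '-') then
    pvAStrip src (j - 1)
  else j
termination_by j
decreasing_by omega

-- outer while loop of A; `sourcecode[:j]` = take j, `sourcecode[i+1:]` = drop (i+1)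
-- (slices with nonnegative in-range bounds, exact)
def pvALoop (acc : List Char) (src : List Char) (i : Nat) : List Char :=
  if h : i < src.length then
    if src[i] = ',' then
      pvALoop (acc ++ src.take (pvAStrip src i) ++ [',']) (src.drop (i + 1)) 0
    else
      pvALoop acc src (i + 1)
  else
    acc ++ src
termination_by (src.length, src.length - i)
decreasing_by
  · left; simp [List.length_drop]; omega
  · right; omega

def optimize_increments_before_input (sourcecode : String) : String :=
  String.mk (pvALoop [] sourcecode.toList 0)

-- ===== PORT B =====
-- `while out and out[-1] in '+-': out.pop()`
def pvPopPM (l : List Char) : List Char :=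
  if h : l ≠ [] then
    if l.getLast h = '+' ∨ l.getLast h = '-' then pvPopPM l.dropLast else l
  else l
termination_by l.length
decreasing_by have := List.length_pos_of_ne_nil h; simp [List.length_dropLast]; omega

-- body of B's for-loop
def pvBStep (out : List Char) (ch : Char) : List Char :=
  if ch = ',' then pvPopPM out ++ [','] else out ++ [ch]

def optimize_increments_before_input_alt (sourcecode : String) : String :=
  String.mk (sourcecode.toList.foldl pvBStep [])

-- ===== PRECONDITION & SPEC =====
def Spec_optimize_increments_before_input (sourcecode : String) (out : String) : Prop := out = optimize_increments_before_input_alt sourcecode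
instance (sourcecode : String) (out : String) : Decidable (Spec_optimize_increments_before_input sourcecode out) := by unfold Spec_optimize_increments_before_input; infer_instance

-- ===== CLAIM (what is proved, stated in full; the proofs are below) =====
def Claim_equal_optimize_increments_before_input : Prop := ∀ (sourcecode : String), Dom_optimize_increments_before_input sourcecode → Spec_optimize_increments_before_input sourcecode (optimize_increments_before_input sourcecode)

-- ===== LEMMAS AND PROOFS =====

-- "out is empty or ends with ','" — invariant on B's accumulator
def pvOk (out : List Char) : Prop := out = [] ∨ out.getLast? = some ','

lemma pvPopPM_ok (out : List Char) (h : pvOk out) : pvPopPM out = out := by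
  cases h with
  | inl h => simp [h, pvPopPM]
  | inr h =>
    rw [pvPopPM]
    have hne : out ≠ [] := by intro he; simp [he] at h
    have : out.getLast hne = ',' := by
      have := List.getLast?_eq_some_getLast (l := out) hne; rw [this] at h; exact Option.some.inj h
    simp [hne, this]

lemma pvPopPM_append (out xs : List Char) (h : pvOk out) :
    pvPopPM (out ++ xs) = out ++ pvPopPM xs := by
  induction xs using List.reverseRecOn with
  | nil => simp only [List.append_nil]; rw [pvPopPM_ok out h]; simp [pvPopPM]
  | append_singleton ys c ih =>
    conv_lhs => rw [pvPopPM]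
    conv_rhs => rw [pvPopPM]
    have h1 : out ++ (ys ++ [c]) ≠ [] := by simp
    have h2 : (ys ++ [c] : List Char) ≠ [] := by simp
    have hl1 : (out ++ (ys ++ [c])).getLast h1 = c := by
      rw [List.getLast_append_of_ne_nil (h₂ := h2)]; exact List.getLast_append_singleton (l := ys)
    have hl2 : (ys ++ [c]).getLast h2 = c := List.getLast_append_singleton (l := ys)
    simp only [h1, h2, hl1, hl2, dif_pos, ne_eq, not_true_eq_false, dite_eq_ite, if_true]
    by_cases hc : c = '+' ∨ c = '-'
    · have : (out ++ (ys ++ [c])).dropLast = out ++ ys := by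
        rw [← List.append_assoc]; exact List.dropLast_concat ..
      simp only [hc, not_false_eq_true, if_true, this, List.dropLast_concat, ih]
    · simp [hc]

lemma pvAStrip_spec (src : List Char) (j : Nat) (hj : j ≤ src.length) :
    src.take (pvAStrip src j) = pvPopPM (src.take j) := by
  induction j with
  | zero => simp [pvAStrip, pvPopPM]
  | succ n ih =>
    rw [pvAStrip]
    have hget : src.getD (n + 1 - 1) ' ' = src[n]'(by omega) := by
      simp [List.getD_eq_getElem?_getD, List.getElem?_eq_getElem (by omega : n < src.length)]
    have hne : src.take (n+1) ≠ [] := by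
      have : (src.take (n+1)).length = n+1 := by rw [List.length_take]; omega
      intro he; rw [he] at this; simp at this
    have hlast : (src.take (n+1)).getLast hne = src[n]'(by omega) := by
      rw [List.getLast_eq_getElem]
      have hlen : (src.take (n+1)).length = n+1 := by rw [List.length_take]; omega
      simp only [hlen]
      simpa using List.getElem_take (l := src) (i := n) (h := by rw [hlen]; omega)
    have hdrop : (src.take (n+1)).dropLast = src.take n := by
      rw [List.dropLast_eq_take, List.take_take, List.length_take]
      congr 1; omega
    by_cases hc : src[n]'(by omega) = '+' ∨ src[n]'(by omega) = '-'
    · have hcond : 0 < n + 1 ∧ (src.getD (n + 1 - 1) ' ' = '+' ∨ src.getD (n + 1 - 1) ' ' = '-') := by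
        refine ⟨Nat.succ_pos n, ?_⟩; rw [hget]; exact hc
      rw [dif_pos hcond]
      rw [pvPopPM]
      simp only [hne, ne_eq, not_true_eq_false, dite_eq_ite, if_true, hlast]
      rw [if_pos hc, hdrop]
      simpa using ih (by omega)
    · have hcond : ¬ (0 < n + 1 ∧ (src.getD (n + 1 - 1) ' ' = '+' ∨ src.getD (n + 1 - 1) ' ' = '-')) := by
        rw [hget]; tauto
      rw [dif_neg hcond]
      rw [pvPopPM]
      simp only [hne, ne_eq, not_true_eq_false, dite_eq_ite, if_true, hlast]
      rw [if_neg hc]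
      simp

lemma pvFoldl_no_comma (xs : List Char) (acc : List Char)
    (h : ∀ c ∈ xs, c ≠ ',') : xs.foldl pvBStep acc = acc ++ xs := by
  induction xs generalizing acc with
  | nil => simp
  | cons c cs ih =>
    have hc : c ≠ ',' := h c (by simp)
    simp only [List.foldl_cons, pvBStep, if_neg hc]
    rw [ih _ (fun d hd => h d (by simp [hd]))]
    simp

lemma pvALoop_eq_foldl (acc src : List Char) (i : Nat)
    (hi : i ≤ src.length) (hnc : ∀ c ∈ src.take i, c ≠ ',') (hok : pvOk acc) :
    pvALoop acc src i = src.foldl pvBStep acc := by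
  induction acc, src, i using pvALoop.induct with
  | case1 acc src i h hcomma ih =>
    rw [pvALoop, dif_pos h, if_pos hcomma]
    rw [ih (by simp) (by simp) (by right; simp)]
    -- src = take i ++ src[i] :: drop (i+1)
    have hsplit : src = src.take i ++ src[i] :: src.drop (i + 1) := by
      conv_lhs => rw [← List.take_append_drop i src]
      congr 1
      exact (List.drop_eq_getElem_cons h).symm ▸ rfl
    conv_rhs => rw [hsplit]
    rw [List.foldl_append, pvFoldl_no_comma _ _ hnc, List.foldl_cons]
    simp only [pvBStep, hcomma, if_pos rfl]
    rw [pvPopPM_append acc _ hok, pvAStrip_spec src i (le_of_lt h)]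
    simp
  | case2 acc src i h hcomma ih =>
    rw [pvALoop, dif_pos h, if_neg hcomma]
    refine ih (by omega) ?_ hok
    intro c hc
    rw [List.take_succ] at hc
    rcases List.mem_append.mp hc with h1 | h2
    · exact hnc c h1
    · have : c = src[i] := by
        simp [List.getElem?_eq_getElem h] at h2; exact h2
      rw [this]; exact hcomma
  | case3 acc src i h =>
    rw [pvALoop, dif_neg h]
    have hi' : i = src.length := by omega
    rw [pvFoldl_no_comma src acc (by subst hi'; simpa using hnc)]

-- ===== VERDICT (by name: the statement is the Claim_ definition above) =====
theorem optimize_increments_before_input_spec : Claim_equal_optimize_increments_before_input := by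
  intro s _
  unfold Spec_optimize_increments_before_input optimize_increments_before_input optimize_increments_before_input_alt
  rw [pvALoop_eq_foldl [] s.toList 0 (by simp) (by simp) (Or.inl rfl)]
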